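-- pv_equiv track=rewrite | github.com/teddygcodes/atlantis | founders/convention.py | _parse_vote
-- ===== SOURCE A (Python) =====
-- def _parse_vote(response_text: str, yes_words=None, no_words=None) -> str:
--     if yes_words is None:
--         yes_words = ["YES", "APPROVE", "AYE", "SUPPORT", "IN FAVOR"]
--     if no_words is None:
--         no_words = ["NO", "REJECT", "NAY", "OPPOSE", "AGAINST"]
--
--     text = (response_text or "").strip().upper()[:50]
--
--     has_yes = any(w in text for w in yes_words)
--     has_no = any(w in text for w in no_words)
--
--     if has_yes and not has_no:
--         return "yes"
--     elif has_no and not has_yes: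
--         return "no"
--     elif has_yes and has_no:
--         first_yes = min((text.find(w) for w in yes_words if w in text), default=999)
--         first_no = min((text.find(w) for w in no_words if w in text), default=999)
--         return "yes" if first_yes < first_no else "no"
--     return "no"  # Default to no if ambiguous
-- ===== SOURCE B (Python) =====
-- def _parse_vote(response_text: str, yes_words=None, no_words=None) -> str:
--     if yes_words is None:
--         yes_words = ["YES", "APPROVE", "AYE", "SUPPORT", "IN FAVOR"]
--     if no_words is None:
--         no_words = ["NO", "REJECT", "NAY", "OPPOSE", "AGAINST"]
--
--     text = (response_text or "").strip().upper()[:50]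
--
--     # Hash-set index of the vote words, probed by slice: scan the len(text)+1 match
--     # positions left to right and return at the first position where any vote word
--     # starts, no-words winning ties.  Per position only one hash lookup per distinct
--     # word length is needed, independent of how many words there are.
--     yes_set = set(yes_words)
--     no_set = set(no_words)
--     lengths = sorted(set(len(w) for w in yes_words + no_words))
--     for i in range(len(text) + 1):
--         if any(text[i:i + L] in no_set for L in lengths):
--             return "no"
--         if any(text[i:i + L] in yes_set for L in lengths):
--             return "yes"
--     return "no"
-- ===== Notes on version B (the rewrite author's own statement) =====
-- stated objective: alternative
-- what changed: A computes has_yes/has_no membership flags, branches four ways and, only when both sides occur, compares min(text.find(w)) per side; B instead builds hash sets of the words plus their distinct lengths and does one left-to-right scan over the match positions of the (same) preprocessed text, probing text[i:i+L] against the sets and returning at the first position where any vote word starts, no-words winning ties.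
import Mathlib
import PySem

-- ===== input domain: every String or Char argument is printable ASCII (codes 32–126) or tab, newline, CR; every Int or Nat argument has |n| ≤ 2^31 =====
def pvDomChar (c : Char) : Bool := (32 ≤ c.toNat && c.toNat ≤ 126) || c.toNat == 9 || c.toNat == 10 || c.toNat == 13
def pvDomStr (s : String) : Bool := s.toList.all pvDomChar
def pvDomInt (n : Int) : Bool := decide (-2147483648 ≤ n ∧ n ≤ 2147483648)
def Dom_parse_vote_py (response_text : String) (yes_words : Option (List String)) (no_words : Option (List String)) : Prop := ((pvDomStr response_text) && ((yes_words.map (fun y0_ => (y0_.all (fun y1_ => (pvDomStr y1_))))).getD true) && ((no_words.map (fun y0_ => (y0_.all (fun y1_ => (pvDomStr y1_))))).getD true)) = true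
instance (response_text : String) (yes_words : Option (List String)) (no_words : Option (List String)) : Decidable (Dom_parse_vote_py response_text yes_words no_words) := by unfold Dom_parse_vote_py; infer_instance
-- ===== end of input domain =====

-- B replaces A's membership-flags + 4-way branch + min-of-finds with one left-to-right
-- scan over match positions (objective: simpler); same return value, no side effects.

-- ===== PORT A =====
-- Literal port of A: has_yes/has_no membership flags, a 4-way branch, and on the
-- both-present branch min(find, default=999) on each side.
def parse_vote_py (response_text : String) (yes_words : Option (List String)) (no_words : Option (List String)) : String :=
  let ys := yes_words.getD ["YES", "APPROVE", "AYE", "SUPPORT", "IN FAVOR"]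
  let ns := no_words.getD ["NO", "REJECT", "NAY", "OPPOSE", "AGAINST"]
  -- (response_text or "").strip().upper()[:50]
  let text := PySem.Str.slice (PySem.Str.upper (PySem.Str.strip (if response_text == "" then "" else response_text))) none (some 50)
  let has_yes := ys.any (fun w => PySem.Str.isIn w text)
  let has_no := ns.any (fun w => PySem.Str.isIn w text)
  if has_yes && !has_no then "yes"
  else if has_no && !has_yes then "no"
  else if has_yes && has_no then
    let first_yes := PySem.List.minD ((ys.filter (fun w => PySem.Str.isIn w text)).map (fun w => PySem.Str.find text w)) (fun x => x) (999 : Int)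
    let first_no := PySem.List.minD ((ns.filter (fun w => PySem.Str.isIn w text)).map (fun w => PySem.Str.find text w)) (fun x => x) (999 : Int)
    if first_yes < first_no then "yes" else "no"
  else "no"

-- ===== PORT B =====
-- B builds a hash-set index of the words (set(yes_words), set(no_words), the sorted
-- distinct word lengths) and scans 'for i in range(len(text)+1)', probing text[i:i+L]
-- against the sets.  The loop state is the suffix text[i:], so the loop is the
-- structural recursion on that suffix and text[i:i+L] is the suffix's slice [:L];
-- the final i = len(text) iteration is the [] base case.
def pvScanB (lens : List Int) (ySet nSet : PySem.Set String) (t : List Char) : String :=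
  if lens.any (fun L => PySem.Set.contains nSet (String.ofList (PySem.List.slice t none (some L)))) then "no"
  else if lens.any (fun L => PySem.Set.contains ySet (String.ofList (PySem.List.slice t none (some L)))) then "yes"
  else
    match t with
    | [] => "no"
    | _ :: r => pvScanB lens ySet nSet r

def parse_vote_py_alt (response_text : String) (yes_words : Option (List String)) (no_words : Option (List String)) : String :=
  let ys := yes_words.getD ["YES", "APPROVE", "AYE", "SUPPORT", "IN FAVOR"]
  let ns := no_words.getD ["NO", "REJECT", "NAY", "OPPOSE", "AGAINST"]
  let text := PySem.Str.slice (PySem.Str.upper (PySem.Str.strip (if response_text == "" then "" else response_text))) none (some 50)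
  let yesSet := PySem.Set.ofList ys
  let noSet := PySem.Set.ofList ns
  let lens := PySem.List.sorted (PySem.Set.ofList ((ys ++ ns).map (fun w => PySem.Str.len w))) (fun x => x) false
  pvScanB lens yesSet noSet text.toList

-- ===== PRECONDITION & SPEC =====
def Spec_parse_vote_py (response_text : String) (yes_words : Option (List String)) (no_words : Option (List String)) (out : String) : Prop := out = parse_vote_py_alt response_text yes_words no_words
instance (response_text : String) (yes_words : Option (List String)) (no_words : Option (List String)) (out : String) : Decidable (Spec_parse_vote_py response_text yes_words no_words out) := by unfold Spec_parse_vote_py; infer_instance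

-- ===== CLAIM (what is proved, stated in full; the proofs are below) =====
def Claim_equal_parse_vote_py : Prop := ∀ (response_text : String) (yes_words : Option (List String)) (no_words : Option (List String)), Dom_parse_vote_py response_text yes_words no_words → Spec_parse_vote_py response_text yes_words no_words (parse_vote_py response_text yes_words no_words)

-- ===== LEMMAS AND PROOFS =====

-- proof-side view of B's scan: the same position scan with the set probes replaced by
-- direct prefix tests (pvScanB_eq_scanW bridges the two)
def pvScanW (ys ns : List String) (t : List Char) : String :=
  if ns.any (fun w => PySem.Chars.startswith t w.toList) then "no"
  else if ys.any (fun w => PySem.Chars.startswith t w.toList) then "yes"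
  else
    match t with
    | [] => "no"
    | _ :: r => pvScanW ys ns r

lemma pv_slice_prefix (t : List Char) (b : Int) : ∃ k, PySem.List.slice t none (some b) = t.take k := by
  rcases (by omega : 0 ≤ b ∨ b < 0) with hb | hb
  · exact ⟨b.toNat, PySem.List.slice_to t hb⟩
  · have hbe : b = -(((-b).toNat : Nat) : Int) := by omega
    rw [hbe]
    exact ⟨t.length - (-b).toNat, PySem.List.slice_to_neg_natCast t (-b).toNat (by omega)⟩

lemma pv_chunk_cond (ws : List String) (lens : List Int) (t : List Char)
    (hsub : ∀ w ∈ ws, ((w.toList.length : Int)) ∈ lens) :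
    lens.any (fun L => PySem.Set.contains (PySem.Set.ofList ws) (String.ofList (PySem.List.slice t none (some L))))
      = ws.any (fun w => PySem.Chars.startswith t w.toList) := by
  rw [Bool.eq_iff_iff]
  constructor
  · intro h
    rw [List.any_eq_true] at h ⊢
    obtain ⟨L, hL, hc⟩ := h
    have hmem : String.ofList (PySem.List.slice t none (some L)) ∈ ws := by
      rw [← PySem.Set.mem_ofList]
      simpa [PySem.Set.contains] using hc
    refine ⟨_, hmem, ?_⟩
    rw [PySem.Chars.startswith_iff]
    obtain ⟨k, hk⟩ := pv_slice_prefix t L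
    rw [hk]
    simpa using List.take_prefix k t
  · intro h
    rw [List.any_eq_true] at h ⊢
    obtain ⟨w, hw, hpre⟩ := h
    rw [PySem.Chars.startswith_iff] at hpre
    refine ⟨(w.toList.length : Int), hsub w hw, ?_⟩
    have hsl : PySem.List.slice t none (some ((w.toList.length : Nat) : Int)) = w.toList := by
      rw [PySem.List.slice_to_natCast]
      exact (List.prefix_iff_eq_take.mp hpre).symm
    rw [hsl]
    simp [PySem.Set.contains, PySem.Set.mem_ofList, hw]

lemma pvScanB_eq_scanW (ys ns : List String) (lens : List Int)
    (hy : ∀ w ∈ ys, ((w.toList.length : Int)) ∈ lens)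
    (hn : ∀ w ∈ ns, ((w.toList.length : Int)) ∈ lens)
    (t : List Char) :
    pvScanB lens (PySem.Set.ofList ys) (PySem.Set.ofList ns) t = pvScanW ys ns t := by
  induction t with
  | nil =>
    rw [pvScanB, pvScanW, pv_chunk_cond ns lens [] hn, pv_chunk_cond ys lens [] hy]
  | cons c r ih =>
    rw [pvScanB, pvScanW, pv_chunk_cond ns lens (c :: r) hn, pv_chunk_cond ys lens (c :: r) hy, ih]

-- first position i (0 ≤ i ≤ len t, as the recursion depth) at which some word of ws
-- starts, none if no word occurs anywhere
def pvFirst (ws : List String) : List Char → Option Nat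
  | [] => if ws.any (fun w => PySem.Chars.startswith ([] : List Char) w.toList) then some 0 else none
  | c :: r =>
    if ws.any (fun w => PySem.Chars.startswith (c :: r) w.toList) then some 0
    else (pvFirst ws r).map (· + 1)

lemma pv_any_startswith (ws : List String) (t : List Char) :
    (ws.any (fun w => PySem.Chars.startswith t w.toList) = true) ↔ ∃ w ∈ ws, w.toList <+: t := by
  simp [List.any_eq_true, PySem.Chars.startswith_iff]

lemma pvFirst_some (ws : List String) (t : List Char) (k : Nat) (h : pvFirst ws t = some k) :
    (∃ w ∈ ws, w.toList <+: t.drop k) ∧ ∀ i < k, ¬ ∃ w ∈ ws, w.toList <+: t.drop i := by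
  induction t generalizing k with
  | nil =>
    by_cases hp : ws.any (fun w => PySem.Chars.startswith ([] : List Char) w.toList) = true
    · simp [pvFirst, hp] at h
      subst h
      exact ⟨(pv_any_startswith ws []).mp hp, by omega⟩
    · simp [pvFirst, hp] at h
  | cons c r ih =>
    by_cases hp : ws.any (fun w => PySem.Chars.startswith (c :: r) w.toList) = true
    · simp [pvFirst, hp] at h
      subst h
      exact ⟨(pv_any_startswith ws (c :: r)).mp hp, by omega⟩
    · simp [pvFirst, hp] at h
      obtain ⟨k', hk', rfl⟩ := h
      obtain ⟨h1, h2⟩ := ih k' hk'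
      refine ⟨by simpa [List.drop_succ_cons] using h1, ?_⟩
      intro i hi
      match i with
      | 0 => exact fun hex => hp ((pv_any_startswith ws (c :: r)).mpr (by simpa using hex))
      | i + 1 =>
        simp only [List.drop_succ_cons]
        exact h2 i (by omega)

lemma pvFirst_none (ws : List String) (t : List Char) (h : pvFirst ws t = none) :
    ∀ i, ¬ ∃ w ∈ ws, w.toList <+: t.drop i := by
  induction t with
  | nil =>
    by_cases hp : ws.any (fun w => PySem.Chars.startswith ([] : List Char) w.toList) = true
    · simp [pvFirst, hp] at h
    · intro i
      exact fun hex => hp ((pv_any_startswith ws []).mpr (by simpa using hex))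
  | cons c r ih =>
    by_cases hp : ws.any (fun w => PySem.Chars.startswith (c :: r) w.toList) = true
    · simp [pvFirst, hp] at h
    · simp [pvFirst, hp] at h
      intro i
      match i with
      | 0 => exact fun hex => hp ((pv_any_startswith ws (c :: r)).mpr (by simpa using hex))
      | i + 1 =>
        simp only [List.drop_succ_cons]
        exact ih h i

-- has_yes / has_no of A = "pvFirst found a position"
lemma pv_any_isIn (ws : List String) (t : List Char) :
    ws.any (fun w => PySem.Chars.isIn w.toList t) = (pvFirst ws t).isSome := by
  cases h : pvFirst ws t with
  | some k =>
    obtain ⟨⟨w, hw, hpre⟩, -⟩ := pvFirst_some ws t k h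
    rw [Option.isSome_some, List.any_eq_true]
    exact ⟨w, hw, (PySem.Chars.exists_prefix_drop_iff_isIn _ _).mp ⟨k, hpre⟩⟩
  | none =>
    rw [Option.isSome_none, List.any_eq_false]
    intro w hw hin
    obtain ⟨j, hj⟩ := (PySem.Chars.exists_prefix_drop_iff_isIn w.toList t).mpr hin
    exact pvFirst_none ws t h j ⟨w, hw, hj⟩

lemma pv_find_le (t : List Char) (w : List Char) (k : Nat) (h : w <+: t.drop k) :
    PySem.Chars.find t w ≤ (k : Int) := by
  have hnn : 0 ≤ PySem.Chars.find t w :=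
    (PySem.Chars.find_nonneg_iff t w).mpr ((PySem.Chars.exists_prefix_drop_iff_isIn w t).mp ⟨k, h⟩ |> (PySem.Chars.isIn_iff_infix w t).mp)
  obtain ⟨-, hmin⟩ := PySem.Chars.find_spec hnn
  by_contra hlt
  exact hmin k (by omega) h

-- A's min(find(w) for present w, default=999) is exactly pvFirst's position
lemma pv_minD_eq (ws : List String) (t : List Char) (k : Nat) (h : pvFirst ws t = some k) :
    PySem.List.minD ((ws.filter (fun w => PySem.Chars.isIn w.toList t)).map (fun w => PySem.Chars.find t w.toList)) (fun x => x) (999 : Int) = (k : Int) := by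
  obtain ⟨⟨w0, hw0, hpre0⟩, hmin⟩ := pvFirst_some ws t k h
  have hw0in : PySem.Chars.isIn w0.toList t = true :=
    (PySem.Chars.exists_prefix_drop_iff_isIn _ _).mp ⟨k, hpre0⟩
  have hmem0 : PySem.Chars.find t w0.toList ∈
      (ws.filter (fun w => PySem.Chars.isIn w.toList t)).map (fun w => PySem.Chars.find t w.toList) :=
    List.mem_map_of_mem (List.mem_filter.mpr ⟨hw0, hw0in⟩)
  cases hm : PySem.List.min? ((ws.filter (fun w => PySem.Chars.isIn w.toList t)).map (fun w => PySem.Chars.find t w.toList)) (fun x => x) with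
  | none =>
    rw [PySem.List.min?_eq_none_iff] at hm
    rw [hm] at hmem0
    simp at hmem0
  | some m =>
    have hmmem := PySem.List.min?_mem hm
    have hmle := PySem.List.min?_isMin hm
    obtain ⟨w1, hw1f, hw1e⟩ := List.mem_map.mp hmmem
    obtain ⟨hw1, hw1in⟩ := List.mem_filter.mp hw1f
    -- m ≤ find t w0 ≤ k
    have hle_k : m ≤ (k : Int) :=
      le_trans (hmle _ hmem0) (pv_find_le t w0.toList k hpre0)
    -- k ≤ m : m is a genuine occurrence position of w1 ∈ ws
    have hmnn : 0 ≤ m := hw1e ▸ (PySem.Chars.find_nonneg_iff t w1.toList).mpr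
      ((PySem.Chars.isIn_iff_infix _ _).mp (by simpa using hw1in))
    have hpre1 : w1.toList <+: t.drop m.toNat := by
      subst hw1e
      exact (PySem.Chars.find_spec hmnn).1
    have hge_k : (k : Int) ≤ m := by
      by_contra hlt
      exact hmin m.toNat (by omega) ⟨w1, hw1, hpre1⟩
    have : m = (k : Int) := le_antisymm hle_k hge_k
    simp [PySem.List.minD, hm, this]

-- the scan result, characterised by the two first-occurrence positions
lemma pv_scan_eq (ys ns : List String) (t : List Char) :
    pvScanW ys ns t =
      match pvFirst ns t, pvFirst ys t with
      | some n, some y => if y < n then "yes" else "no"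
      | some _, none => "no"
      | none, some _ => "yes"
      | none, none => "no" := by
  induction t with
  | nil =>
    by_cases hn : ns.any (fun w => PySem.Chars.startswith ([] : List Char) w.toList) = true
    · by_cases hy : ys.any (fun w => PySem.Chars.startswith ([] : List Char) w.toList) = true
      · simp [pvScanW, pvFirst, hn, hy]
      · simp [pvScanW, pvFirst, hn, hy]
    · by_cases hy : ys.any (fun w => PySem.Chars.startswith ([] : List Char) w.toList) = true
      · simp [pvScanW, pvFirst, hn, hy]
      · simp [pvScanW, pvFirst, hn, hy]
  | cons c r ih =>
    by_cases hn : ns.any (fun w => PySem.Chars.startswith (c :: r) w.toList) = true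
    · have hns : pvFirst ns (c :: r) = some 0 := by simp [pvFirst, hn]
      rw [pvScanW, if_pos hn, hns]
      cases pvFirst ys (c :: r) with
      | none => rfl
      | some y => simp
    · by_cases hy : ys.any (fun w => PySem.Chars.startswith (c :: r) w.toList) = true
      · have hys : pvFirst ys (c :: r) = some 0 := by simp [pvFirst, hy]
        have hns : pvFirst ns (c :: r) = (pvFirst ns r).map (· + 1) := by simp [pvFirst, hn]
        rw [pvScanW, if_neg hn, if_pos hy, hys, hns]
        cases pvFirst ns r with
        | none => rfl
        | some n => simp
      · rw [pvScanW, if_neg hn, if_neg hy]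
        rw [ih]
        simp only [pvFirst, hn, hy]
        cases pvFirst ns r with
        | none =>
          cases pvFirst ys r with
          | none => simp
          | some y => simp
        | some n =>
          cases pvFirst ys r with
          | none => simp
          | some y =>
            simp only [Option.map_some]
            by_cases hlt : y < n
            · simp [hlt]
            · simp [hlt]

-- the two programs agree for ANY word lists and any (already preprocessed) text
lemma pv_core (ys ns : List String) (t : List Char) :
    (if (ys.any (fun w => PySem.Chars.isIn w.toList t)) && !(ns.any (fun w => PySem.Chars.isIn w.toList t)) then "yes"
     else if (ns.any (fun w => PySem.Chars.isIn w.toList t)) && !(ys.any (fun w => PySem.Chars.isIn w.toList t)) then "no"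
     else if (ys.any (fun w => PySem.Chars.isIn w.toList t)) && (ns.any (fun w => PySem.Chars.isIn w.toList t)) then
       (if PySem.List.minD ((ys.filter (fun w => PySem.Chars.isIn w.toList t)).map (fun w => PySem.Chars.find t w.toList)) (fun x => x) (999 : Int)
           < PySem.List.minD ((ns.filter (fun w => PySem.Chars.isIn w.toList t)).map (fun w => PySem.Chars.find t w.toList)) (fun x => x) (999 : Int)
        then "yes" else "no")
     else "no")
    = pvScanW ys ns t := by
  rw [pv_scan_eq, pv_any_isIn, pv_any_isIn]
  cases hnf : pvFirst ns t with
  | none =>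
    cases hyf : pvFirst ys t with
    | none => simp
    | some y => simp
  | some n =>
    cases hyf : pvFirst ys t with
    | none => simp
    | some y =>
      simp only [Option.isSome_some, Bool.not_true, Bool.and_false, Bool.and_self]
      rw [pv_minD_eq ys t y hyf, pv_minD_eq ns t n hnf]
      by_cases hlt : y < n
      · have h2 : (y : Int) < (n : Int) := by exact_mod_cast hlt
        simp [hlt, h2]
      · have h2 : ¬ ((y : Int) < (n : Int)) := by exact_mod_cast hlt
        simp [hlt, h2]

-- ===== VERDICT (by name: the statement is the Claim_ definition above) =====
theorem parse_vote_py_spec : Claim_equal_parse_vote_py := by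
  intro response_text yes_words no_words _
  unfold Spec_parse_vote_py parse_vote_py parse_vote_py_alt
  simp only [PySem.Str.isIn_eq, PySem.Str.find_eq]
  rw [pvScanB_eq_scanW]
  · exact pv_core _ _ _
  · intro w hw
    simp only [PySem.List.mem_sorted, PySem.Set.mem_ofList, List.mem_map, List.mem_append,
      PySem.Str.len_eq]
    exact ⟨w, Or.inl hw, rfl⟩
  · intro w hw
    simp only [PySem.List.mem_sorted, PySem.Set.mem_ofList, List.mem_map, List.mem_append,
      PySem.Str.len_eq]
    exact ⟨w, Or.inr hw, rfl⟩
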